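-- pv_equiv track=rewrite | github.com/ChristianChaffee/urp | server/find_getrakserver.py | search
-- ===== SOURCE A (Python) =====
-- def search(data, pattern, mask):
--     n = len(mask)
--     for i in range(len(data) - n + 1):
--         ok = True
--         for j, (b, m) in enumerate(zip(pattern, mask)):
--             if m == "x" and data[i + j] != b:
--                 ok = False
--                 break
--         if ok:
--             return i
--     return -1
-- ===== SOURCE B (Python) =====
-- def search(data, pattern, mask):
--     # Check-major: keep a (sorted) set of candidate offsets and narrow it with one
--     # filtering pass per significant mask position; the first survivor is the answer.
--     candidates = list(range(len(data) - len(mask) + 1))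
--     for j, (b, m) in enumerate(zip(pattern, mask)):
--         if m == "x":
--             candidates = [i for i in candidates if data[i + j] == b]
--     return candidates[0] if candidates else -1
-- ===== Notes on version B (the rewrite author's own statement) =====
-- stated objective: alternative
-- what changed: B inverts the loop nesting: instead of scanning the mask at each offset (offset-major with early break), it keeps the sorted set of all candidate offsets and performs one filtering pass over it per significant mask position, returning the first surviving candidate; correctness relies on the first match being the minimum offset passing all checks.
import Mathlib
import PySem

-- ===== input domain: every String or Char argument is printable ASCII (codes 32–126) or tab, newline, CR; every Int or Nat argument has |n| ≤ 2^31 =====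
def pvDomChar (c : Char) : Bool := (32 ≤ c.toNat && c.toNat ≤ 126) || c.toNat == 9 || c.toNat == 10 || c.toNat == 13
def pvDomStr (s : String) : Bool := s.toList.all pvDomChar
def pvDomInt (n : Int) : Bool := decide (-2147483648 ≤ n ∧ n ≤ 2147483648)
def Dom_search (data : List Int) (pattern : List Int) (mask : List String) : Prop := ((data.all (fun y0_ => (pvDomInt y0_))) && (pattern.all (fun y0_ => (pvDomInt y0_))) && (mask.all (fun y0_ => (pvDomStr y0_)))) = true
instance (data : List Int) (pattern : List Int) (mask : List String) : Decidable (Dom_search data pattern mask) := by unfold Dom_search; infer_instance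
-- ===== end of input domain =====

-- B inverts the loop nesting: one filtering pass over the sorted candidate-offset set per
-- significant mask position, then the first survivor (alternative algorithm shape, same cost class).


-- ===== PORT A =====
-- inner loop of A: for j,(b,m) in enumerate(zip(pattern,mask)): if m=="x" and data[i+j]!=b: break
-- data[i+j] is always in range here (j < len(mask), 0 ≤ i ≤ len(data)-len(mask)), so getD 0 is never taken.
def searchInnerA (data : List Int) (i : Int) (pairs : List (Int × String)) (j : Int) : Bool :=
  match pairs with
  | [] => true
  | (b, m) :: rest =>
    if m = "x" ∧ (PySem.List.pyGet? data (i + j)).getD 0 ≠ b then false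
    else searchInnerA data i rest (j + 1)

def searchOuterA (data : List Int) (pattern : List Int) (mask : List String) (is : List Int) : Int :=
  match is with
  | [] => -1
  | i :: rest =>
    if searchInnerA data i (pattern.zip mask) 0 then i
    else searchOuterA data pattern mask rest

def search (data : List Int) (pattern : List Int) (mask : List String) : Int :=
  let n : Int := mask.length
  searchOuterA data pattern mask (PySem.List.pyRange 0 ((data.length : Int) - n + 1) 1)

-- ===== PORT B =====
-- for j,(b,m) in enumerate(zip(pattern,mask)): if m=="x": candidates=[i for i in candidates if data[i+j]==b]
def filterPassB (data : List Int) (cands : List Int) (pairs : List (Int × String)) (j : Int) : List Int :=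
  match pairs with
  | [] => cands
  | (b, m) :: rest =>
    if m = "x" then
      filterPassB data (cands.filter (fun i => (PySem.List.pyGet? data (i + j)).getD 0 = b)) rest (j + 1)
    else filterPassB data cands rest (j + 1)

-- candidates[0] if candidates else -1
def search_alt (data : List Int) (pattern : List Int) (mask : List String) : Int :=
  let cands := filterPassB data (PySem.List.pyRange 0 ((data.length : Int) - (mask.length : Int) + 1) 1) (pattern.zip mask) 0
  match cands with
  | [] => -1
  | i :: _ => i

-- ===== PRECONDITION & SPEC =====
def Spec_search (data : List Int) (pattern : List Int) (mask : List String) (out : Int) : Prop := out = search_alt data pattern mask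
instance (data : List Int) (pattern : List Int) (mask : List String) (out : Int) : Decidable (Spec_search data pattern mask out) := by unfold Spec_search; infer_instance

-- ===== CLAIM (what is proved, stated in full; the proofs are below) =====
def Claim_equal_search : Prop := ∀ (data : List Int) (pattern : List Int) (mask : List String), Dom_search data pattern mask → Spec_search data pattern mask (search data pattern mask)

-- ===== LEMMAS AND PROOFS =====
-- staged filtering = one filter by A's conjoined inner predicate
theorem filterPass_eq (data : List Int) (pairs : List (Int × String)) (cands : List Int) (j : Int) :
    filterPassB data cands pairs j = cands.filter (fun i => searchInnerA data i pairs j) := by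
  induction pairs generalizing cands j with
  | nil => simp [filterPassB, searchInnerA]
  | cons hd tl ih =>
    obtain ⟨b, m⟩ := hd
    by_cases hm : m = "x"
    · simp only [filterPassB, hm, if_pos rfl, ih, List.filter_filter]
      apply List.filter_congr
      intro i _
      by_cases hv : (PySem.List.pyGet? data (i + j)).getD 0 = b
      · simp [searchInnerA, hv]
      · simp [searchInnerA, hv]
    · simp only [filterPassB, hm, if_neg hm, ih]
      apply List.filter_congr
      intro i _
      simp [searchInnerA, hm]

-- A's first-match loop = head of the filtered candidate list
theorem outerA_eq_filter (data : List Int) (pattern : List Int) (mask : List String) (is : List Int) :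
    searchOuterA data pattern mask is
      = match is.filter (fun i => searchInnerA data i (pattern.zip mask) 0) with
        | [] => -1
        | i :: _ => i := by
  induction is with
  | nil => rfl
  | cons i rest ih =>
    by_cases h : searchInnerA data i (pattern.zip mask) 0
    · simp [searchOuterA, h, List.filter]
    · simp [searchOuterA, h, ih]

-- ===== VERDICT (by name: the statement is the Claim_ definition above) =====
theorem search_spec : Claim_equal_search := by
  intro data pattern mask _
  unfold Spec_search search search_alt
  simp only [filterPass_eq, outerA_eq_filter]
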